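-- pv_equiv track=rewrite | github.com/cuhkshenzhen/taxi | basic_stats/individual_behavior.py | sort_by_dist
-- ===== SOURCE A (Python) =====
-- def sort_by_dist(dist_dict):
-- 	dist_list = [0 for i in range(30)]
-- 	dist_car_list = []
-- 	for key, val in dist_dict.items():
-- 		dist_car_list.append((val, key))
-- 	dist_car_list.sort()
-- 	# minimum = dist_list[0][0], maximum = dist_list[-1][0]
-- 	for dist_car in dist_car_list:
-- 		for i in range(30):
-- 			if dist_car[0] > 50*i and dist_car[0] <= 50*(i+1):
-- 				dist_list[i] += 1
-- 				break
-- 	return dist_list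
-- ===== SOURCE B (Python) =====
-- def sort_by_dist(dist_dict):
--     dist_list = [0] * 30
--     for val in dist_dict.values():
--         if 0 < val <= 1500:
--             dist_list[(val - 1) // 50] += 1
--     return dist_list
-- ===== Notes on version B (the rewrite author's own statement) =====
-- stated objective: faster
-- what changed: B drops the sort and the 30-way inner scan entirely: one pass over the dict values, computing the bin index directly as (val-1)//50 with a range check.
import Mathlib
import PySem

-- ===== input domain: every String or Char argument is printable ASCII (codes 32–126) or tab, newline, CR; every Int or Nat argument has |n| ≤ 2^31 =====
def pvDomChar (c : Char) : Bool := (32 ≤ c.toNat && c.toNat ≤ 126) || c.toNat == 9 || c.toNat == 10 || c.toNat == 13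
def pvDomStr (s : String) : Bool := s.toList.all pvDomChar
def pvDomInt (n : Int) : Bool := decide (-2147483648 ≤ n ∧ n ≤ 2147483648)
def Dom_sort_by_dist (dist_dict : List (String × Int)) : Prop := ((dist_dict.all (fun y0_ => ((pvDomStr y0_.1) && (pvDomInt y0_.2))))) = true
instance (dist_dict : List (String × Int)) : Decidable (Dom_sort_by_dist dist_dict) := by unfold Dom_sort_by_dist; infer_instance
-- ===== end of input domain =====

-- B replaces A's sort + 30-way inner scan by a single pass computing the bin index arithmetically (objective: faster, one O(n) pass).

-- ===== PORT A =====
-- the inner 'for i in range(30): if … : dist_list[i] += 1; break' loop of A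
def pvBinLoop (v : Int) : List Int → List Int → List Int
  | [], lst => lst
  | i :: rest, lst =>
      if v > 50 * i ∧ v ≤ 50 * (i + 1) then lst.modify i.toNat (· + 1)
      else pvBinLoop v rest lst

def sort_by_dist (dist_dict : List (String × Int)) : List Int :=
  let dist_list : List Int := (PySem.List.pyRange 0 30).map (fun _ => 0)
  let dist_car_list : List (Int × String) :=
    dist_dict.foldl (fun acc kv => acc ++ [(kv.2, kv.1)]) []
  let sortedL := PySem.List.sorted2 dist_car_list (fun p => p.1) (fun p => p.2)
  sortedL.foldl (fun lst dc => pvBinLoop dc.1 (PySem.List.pyRange 0 30) lst) dist_list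

-- ===== PORT B =====
def sort_by_dist_alt (dist_dict : List (String × Int)) : List Int :=
  dist_dict.foldl
    (fun lst kv =>
      if 0 < kv.2 ∧ kv.2 ≤ 1500 then
        lst.modify (PySem.Int.floordiv (kv.2 - 1) 50).toNat (· + 1)
      else lst)
    (List.replicate 30 0)

-- ===== PRECONDITION & SPEC =====
def Spec_sort_by_dist (dist_dict : List (String × Int)) (out : List Int) : Prop := out = sort_by_dist_alt dist_dict
instance (dist_dict : List (String × Int)) (out : List Int) : Decidable (Spec_sort_by_dist dist_dict out) := by unfold Spec_sort_by_dist; infer_instance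

-- ===== CLAIM (what is proved, stated in full; the proofs are below) =====
def Claim_equal_sort_by_dist : Prop := ∀ (dist_dict : List (String × Int)), Dom_sort_by_dist dist_dict → Spec_sort_by_dist dist_dict (sort_by_dist dist_dict)

-- ===== LEMMAS AND PROOFS =====

-- B's per-value update
def pvBump (lst : List Int) (v : Int) : List Int :=
  if 0 < v ∧ v ≤ 1500 then lst.modify (PySem.Int.floordiv (v - 1) 50).toNat (· + 1) else lst

lemma pvBinLoop_from (n : ℕ) : ∀ (k : ℕ), k + n = 30 → ∀ (v : Int) (lst : List Int),
    50 * (k : Int) < v →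
    pvBinLoop v (PySem.List.pyRange (k : Int) 30) lst =
      if v ≤ 1500 then lst.modify (PySem.Int.floordiv (v - 1) 50).toNat (· + 1) else lst := by
  induction n with
  | zero =>
    intro k hk v lst hv
    have hk30 : k = 30 := by omega
    subst hk30
    have h1 : ¬ v ≤ 1500 := by omega
    simp [PySem.List.pyRange, pvBinLoop, h1]
  | succ n ih =>
    intro k hk v lst hv
    have hlt : (k : Int) < 30 := by omega
    rw [PySem.List.pyRange_one_cons hlt]
    by_cases hle : v ≤ 50 * ((k : Int) + 1)
    · have hcond : v > 50 * (k : Int) ∧ v ≤ 50 * ((k : Int) + 1) := ⟨hv, hle⟩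
      have hdiv : PySem.Int.floordiv (v - 1) 50 = (k : Int) := by
        rw [PySem.Int.floordiv_eq_iff_of_pos (by omega)]
        omega
      have h1500 : v ≤ 1500 := by omega
      simp only [pvBinLoop, if_pos hcond, hdiv, Int.toNat_natCast, if_pos h1500]
    · have hcond : ¬ (v > 50 * (k : Int) ∧ v ≤ 50 * ((k : Int) + 1)) := by omega
      simp only [pvBinLoop, if_neg hcond]
      have hcast : ((k : Int) + 1) = ((k + 1 : ℕ) : Int) := by push_cast; ring
      rw [hcast, ih (k + 1) (by omega) v lst (by push_cast; omega)]

lemma pvBinLoop_nonpos (v : Int) (hv : v ≤ 0) :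
    ∀ (is : List Int), (∀ i ∈ is, 0 ≤ i) → ∀ lst, pvBinLoop v is lst = lst := by
  intro is
  induction is with
  | nil => intro _ lst; simp [pvBinLoop]
  | cons i rest ih =>
    intro h lst
    have hi : 0 ≤ i := h i (by simp)
    have hcond : ¬ (v > 50 * i ∧ v ≤ 50 * (i + 1)) := by
      rintro ⟨h1, _⟩; omega
    simp only [pvBinLoop, if_neg hcond]
    exact ih (fun j hj => h j (by simp [hj])) lst

lemma pvBinLoop_eq_bump (v : Int) (lst : List Int) :
    pvBinLoop v (PySem.List.pyRange 0 30) lst = pvBump lst v := by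
  by_cases hv : 0 < v
  · have := pvBinLoop_from 30 0 rfl v lst (by omega)
    simpa [pvBump, hv] using this
  · have hz : ¬ (0 < v ∧ v ≤ 1500) := fun h => hv h.1
    rw [pvBump, if_neg hz]
    exact pvBinLoop_nonpos v (by omega) _
      (fun i hi => ((PySem.List.mem_pyRange_one).mp hi).1) lst

lemma modify_add_comm (l : List Int) (i j : ℕ) :
    (l.modify i (· + 1)).modify j (· + 1) = (l.modify j (· + 1)).modify i (· + 1) := by
  apply List.ext_getElem
  · simp
  · intro p hp hq
    simp only [List.getElem_modify]
    split_ifs <;> simp_all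

lemma pvBump_comm (lst : List Int) (a b : Int) :
    pvBump (pvBump lst a) b = pvBump (pvBump lst b) a := by
  unfold pvBump
  split_ifs <;> first | rfl | exact modify_add_comm lst _ _

-- ===== VERDICT (by name: the statement is the Claim_ definition above) =====
theorem sort_by_dist_spec : Claim_equal_sort_by_dist := by
  intro dist_dict _
  unfold Spec_sort_by_dist sort_by_dist sort_by_dist_alt
  simp only []
  rw [PySem.List.foldl_append_singleton_eq_map, List.nil_append]
  have hstep : (fun (lst : List Int) (dc : Int × String) =>
      pvBinLoop dc.1 (PySem.List.pyRange 0 30) lst) = (fun lst dc => pvBump lst dc.1) := by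
    funext lst dc; exact pvBinLoop_eq_bump dc.1 lst
  rw [hstep]
  have hperm := PySem.List.sorted2_perm
    (dist_dict.map (fun kv => (kv.2, kv.1))) (fun p => p.1) (fun p => p.2) false
  have hinit : ((PySem.List.pyRange 0 30).map (fun _ => (0 : Int))) = List.replicate 30 0 := by
    decide
  rw [hinit]
  rw [@List.Perm.foldl_eq _ _ (fun lst dc => pvBump lst dc.1) _ _
    ⟨fun lst a b => pvBump_comm lst a.1 b.1⟩ hperm (List.replicate 30 0)]
  rw [List.foldl_map]
  rfl
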